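-- pv_equiv track=rewrite | github.com/AP-MI-2021/lab-3-AndreiBaloniu | main.py | get_longest_all_palindromes
-- ===== SOURCE A (Python) =====
-- def get_palindrome(nr):
--     """
--     Determina daca un numar este palindrom
--     :param nr: numar
--     :return: 1 daca e palindrom, 0 in caz contrar
--     """
--     inv = nr
--     palindrome = 0
--     while inv > 0:
--         palindrome = palindrome * 10 + inv % 10
--         inv = inv // 10
--     if palindrome == nr:
--         return 1
--     return 0
--
-- def get_longest_all_palindromes(lst):
--     """
--     Determina cea mai lunga subsecventa cu proprietatea ca toate numerele sunt palindroame
--     :param lst: lista cu care lucram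
--     :return: rezultat -> cea mai lunga subsecventa cu proprietatea ca toate numerele sunt palindrome
--     """
--     # lungimea listei
--     n = len(lst)
--     rezultat = []
--     for stanga in range(n):
--         for dreapta in range(stanga, n):
--             all_palindromes = True
--             for num in lst[stanga:dreapta + 1]:
--                 if get_palindrome(num) == 0:
--                     all_palindromes = False
--                     break
--             if all_palindromes:
--                 if dreapta - stanga + 1 > len(rezultat):
--                     rezultat = lst[stanga:dreapta + 1]
--     return rezultat
-- ===== SOURCE B (Python) =====
-- def get_palindrome(nr):
--     """1 daca nr este palindrom (inversul cifrelor egal cu nr), 0 altfel."""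
--     inv = nr
--     palindrome = 0
--     while inv > 0:
--         palindrome = palindrome * 10 + inv % 10
--         inv = inv // 10
--     if palindrome == nr:
--         return 1
--     return 0
--
-- def get_longest_all_palindromes(lst):
--     """Single left-to-right pass over maximal palindrome runs; keeps the first longest run."""
--     best = []
--     xs = lst
--     while xs:
--         if get_palindrome(xs[0]) == 1:
--             k = 1
--             while k < len(xs) and get_palindrome(xs[k]) == 1:
--                 k += 1
--             if k > len(best):
--                 best = xs[:k]
--             xs = xs[k:]
--         else:
--             xs = xs[1:]
--     return best
-- ===== Notes on version B (the rewrite author's own statement) =====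
-- stated objective: faster
-- what changed: Replaced the triple loop over all (left,right) slices with a single left-to-right pass that skips over each maximal run of consecutive palindromes and keeps the first longest run.
import Mathlib
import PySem

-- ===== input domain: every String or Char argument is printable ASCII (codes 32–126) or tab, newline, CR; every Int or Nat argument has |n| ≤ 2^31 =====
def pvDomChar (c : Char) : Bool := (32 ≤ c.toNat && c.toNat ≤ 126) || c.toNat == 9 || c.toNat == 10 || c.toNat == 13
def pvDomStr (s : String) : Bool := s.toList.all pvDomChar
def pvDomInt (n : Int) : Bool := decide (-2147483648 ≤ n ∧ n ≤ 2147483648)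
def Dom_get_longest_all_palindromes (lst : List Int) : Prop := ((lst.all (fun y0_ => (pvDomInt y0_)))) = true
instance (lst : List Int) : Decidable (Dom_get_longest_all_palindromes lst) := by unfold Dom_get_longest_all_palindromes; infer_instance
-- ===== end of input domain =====

-- B replaces A's triple loop over all (left,right) slices with one left-to-right pass
-- that skips over each maximal run of consecutive palindromes, keeping the first longest run.

-- ===== PORT A =====
-- while inv > 0: palindrome = palindrome * 10 + inv % 10; inv = inv // 10
def gpLoop (inv palindrome : Int) : Int :=
  if inv > 0 then
    gpLoop (PySem.Int.floordiv inv 10) (palindrome * 10 + PySem.Int.mod inv 10)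
  else palindrome
termination_by inv.toNat
decreasing_by rw [PySem.Int.floordiv_eq_ediv_of_pos (by omega)]; omega

def get_palindrome (nr : Int) : Int :=
  if gpLoop nr 0 = nr then 1 else 0

def get_longest_all_palindromes (lst : List Int) : List Int :=
  let n : Int := lst.length
  (PySem.List.pyRange 0 n 1).foldl (fun rezultat stanga =>
    (PySem.List.pyRange stanga n 1).foldl (fun rezultat dreapta =>
      if (PySem.List.slice lst (some stanga) (some (dreapta + 1))).all
           (fun num => !(get_palindrome num == 0)) then
        (if dreapta - stanga + 1 > (rezultat.length : Int) then
          PySem.List.slice lst (some stanga) (some (dreapta + 1))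
        else rezultat)
      else rezultat) rezultat) []

-- ===== PORT B =====
-- best = []; walk the list; on a palindrome head, count the whole run (k), keep it if longer, skip it.
def goB (best xs : List Int) : List Int :=
  match xs with
  | [] => best
  | x :: t =>
    if get_palindrome x = 1 then
      let k := (t.takeWhile (fun y => get_palindrome y = 1)).length + 1
      goB (if (k : Int) > (best.length : Int) then (x :: t).take k else best) (t.drop (k - 1))
    else goB best t
termination_by xs.length
decreasing_by all_goals simp

def get_longest_all_palindromes_alt (lst : List Int) : List Int := goB [] lst

-- ===== LEMMAS AND PROOFS =====

-- ===== PRECONDITION & SPEC =====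
def Spec_get_longest_all_palindromes (lst : List Int) (out : List Int) : Prop := out = get_longest_all_palindromes_alt lst
instance (lst : List Int) (out : List Int) : Decidable (Spec_get_longest_all_palindromes lst out) := by unfold Spec_get_longest_all_palindromes; infer_instance

-- ===== CLAIM (what is proved, stated in full; the proofs are below) =====
def Claim_equal_get_longest_all_palindromes : Prop := ∀ (lst : List Int), Dom_get_longest_all_palindromes lst → Spec_get_longest_all_palindromes lst (get_longest_all_palindromes lst)

-- ===== LEMMAS AND PROOFS =====

def pB (y : Int) : Bool := get_palindrome y = 1

-- length of the palindrome run at the head of ys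
def runLen (ys : List Int) : Nat := (ys.takeWhile pB).length

-- A's inner-loop body, in Nat form (ys = lst.drop s, j = dreapta - stanga)
def stepIn (ys rez : List Int) (j : Nat) : List Int :=
  if (ys.take (j + 1)).all pB = true then
    (if j + 1 > rez.length then ys.take (j + 1) else rez)
  else rez

-- A's outer-loop body after the inner loop is summarised
def stepOut (lst rez : List Int) (s : Nat) : List Int :=
  if runLen (lst.drop s) > rez.length then (lst.drop s).takeWhile pB else rez

theorem gp01 (n : Int) : get_palindrome n = 0 ∨ get_palindrome n = 1 := by
  unfold get_palindrome; split <;> simp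

theorem gpB_eq : (fun num : Int => !(get_palindrome num == 0)) = pB := by
  funext n; rcases gp01 n with h | h <;> simp [pB, h]

theorem runLen_le (ys : List Int) : runLen ys ≤ ys.length :=
  (List.takeWhile_prefix pB).length_le

theorem take_runLen (ys : List Int) : ys.take (runLen ys) = ys.takeWhile pB :=
  (List.prefix_iff_eq_take.mp (List.takeWhile_prefix pB)).symm

theorem all_take_iff (ys : List Int) (m : Nat) (h : m ≤ ys.length) :
    ((ys.take m).all pB = true) ↔ m ≤ runLen ys := by
  induction ys generalizing m with
  | nil => simp at h; simp [h]
  | cons y t ih =>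
    cases m with
    | zero => simp [runLen]
    | succ m =>
      cases hy : pB y with
      | false =>
        have h0 : runLen (y :: t) = 0 := by simp [runLen, hy]
        simp [hy, h0]
      | true =>
        have h1 : runLen (y :: t) = runLen t + 1 := by
          simp [runLen, hy]
        simp only [List.take_succ_cons, List.all_cons, hy, Bool.true_and, h1]
        simp at h
        rw [ih m (by omega)]
        omega

theorem takeWhile_drop (ys : List Int) (i : Nat) (h : i ≤ runLen ys) :
    (ys.drop i).takeWhile pB = (ys.takeWhile pB).drop i := by
  induction ys generalizing i with
  | nil => simp
  | cons y t ih =>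
    cases i with
    | zero => simp
    | succ i =>
      have hy : pB y = true := by
        by_contra hy
        simp only [runLen, List.takeWhile_cons] at h
        rw [Bool.not_eq_true] at hy
        simp [hy] at h
      simp only [runLen, List.takeWhile_cons, hy, if_true, List.length_cons] at h ⊢
      simp only [List.drop_succ_cons]
      exact ih i (by unfold runLen; omega)

theorem runLen_drop (ys : List Int) (i : Nat) (h : i ≤ runLen ys) :
    runLen (ys.drop i) = runLen ys - i := by
  unfold runLen
  rw [takeWhile_drop ys i h, List.length_drop]

theorem foldl_keep (lst : List Int) (l : List Nat) (b : List Int)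
    (h : ∀ x ∈ l, stepOut lst b x = b) : l.foldl (stepOut lst) b = b := by
  induction l with
  | nil => rfl
  | cons x t ih =>
    rw [List.foldl_cons, h x (by simp)]
    exact ih (fun y hy => h y (by simp [hy]))

theorem stepIn_update (ys rez : List Int) (j : Nat) (h1 : j + 1 ≤ ys.length)
    (h2 : j + 1 ≤ runLen ys) (h3 : j + 1 > rez.length) :
    stepIn ys rez j = ys.take (j + 1) := by
  unfold stepIn
  rw [if_pos ((all_take_iff ys (j+1) h1).mpr h2), if_pos h3]

theorem stepIn_keep (ys rez : List Int) (j : Nat) (h1 : j + 1 ≤ ys.length)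
    (h2 : runLen ys ≤ j ∨ j + 1 ≤ rez.length) :
    stepIn ys rez j = rez := by
  unfold stepIn
  rcases h2 with h2 | h2
  · rw [if_neg]; intro hc
    exact absurd ((all_take_iff ys (j+1) h1).mp hc) (by omega)
  · split
    · rw [if_neg (by omega)]
    · rfl

theorem inner_fold (ys : List Int) (m : Nat) : ∀ (j : Nat) (rez : List Int),
    j + m ≤ ys.length → (j ≤ rez.length ∨ runLen ys ≤ j) →
    (List.range' j m).foldl (stepIn ys) rez =
      if min (runLen ys) (j + m) > rez.length ∧ j < runLen ys then
        ys.take (min (runLen ys) (j + m))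
      else rez := by
  induction m with
  | zero =>
    intro j rez h hinv
    rw [if_neg (by omega)]; rfl
  | succ m ih =>
    intro j rez h hinv
    rw [List.range'_succ, List.foldl_cons]
    have hjm : j + 1 + m = j + (m + 1) := by omega
    by_cases hp : j + 1 ≤ runLen ys
    · by_cases hl : j + 1 > rez.length
      · rw [stepIn_update ys rez j (by omega) hp hl]
        have hlen : (ys.take (j + 1)).length = j + 1 := by rw [List.length_take]; omega
        rw [ih (j + 1) _ (by omega) (by rw [hlen]; omega)]
        rw [hlen, hjm]
        have hcond : min (runLen ys) (j + (m + 1)) > rez.length ∧ j < runLen ys := by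
          constructor <;> omega
        rw [if_pos hcond]
        split
        · rfl
        · have hK : min (runLen ys) (j + (m + 1)) = j + 1 := by omega
          rw [hK]
      · rw [stepIn_keep ys rez j (by omega) (by omega)]
        rw [ih (j + 1) rez (by omega) (by omega)]
        rw [hjm]
        split <;> split <;> first | rfl | omega
    · rw [stepIn_keep ys rez j (by omega) (by omega)]
      rw [ih (j + 1) rez (by omega) (by omega)]
      rw [hjm]
      split <;> split <;> first | rfl | omega

theorem inner_eq (ys rez : List Int) :
    (List.range' 0 ys.length).foldl (stepIn ys) rez =
      if runLen ys > rez.length then ys.takeWhile pB else rez := by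
  rw [inner_fold ys ys.length 0 rez (by omega) (by omega)]
  have hm : min (runLen ys) (0 + ys.length) = runLen ys := by
    have := runLen_le ys; omega
  rw [hm]
  by_cases h : runLen ys > rez.length
  · rw [if_pos ⟨h, by omega⟩, if_pos h, take_runLen]
  · rw [if_neg (by omega), if_neg h]


theorem A_eq (lst : List Int) :
    get_longest_all_palindromes lst = (List.range' 0 lst.length).foldl (stepOut lst) [] := by
  unfold get_longest_all_palindromes
  dsimp only
  rw [PySem.List.pyRange_zero_natCast, List.foldl_map, ← List.range_eq_range']
  apply PySem.List.foldl_congr_mem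
  intro rez s hs
  have hs' : s < lst.length := List.mem_range.mp hs
  -- inner loop
  rw [PySem.List.pyRange_one]
  have ht : (((lst.length:Nat):Int) - ((s:Nat):Int)).toNat = lst.length - s := by omega
  rw [ht, List.foldl_map]
  have hlen : (lst.drop s).length = lst.length - s := by simp
  have hconv : ∀ rez, (List.range (lst.length - s)).foldl
      (fun rez (k:Nat) =>
        if ((PySem.List.slice lst (some ((s:Int))) (some ((s:Int) + (k:Int) + 1))).all fun num => !get_palindrome num == 0) = true then
          if (s:Int) + (k:Int) - (s:Int) + 1 > (rez.length:Int) then PySem.List.slice lst (some ((s:Int))) (some ((s:Int) + (k:Int) + 1))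
          else rez
        else rez) rez
      = (List.range' 0 ((lst.drop s).length)).foldl (stepIn (lst.drop s)) rez := by
    intro rez
    rw [← List.range_eq_range', hlen]
    apply PySem.List.foldl_congr_mem
    intro rez' j hj
    have hj' : j < lst.length - s := List.mem_range.mp hj
    have hcast : ((s:Int) + (j:Int) + 1) = ((s:Int) + ((j+1:Nat):Int)) := by push_cast; ring
    rw [hcast, PySem.List.slice_natCast_add, gpB_eq]
    unfold stepIn
    simp only [show ((s:Int) + (j:Int) - (s:Int) + 1 > ((rez'.length:Nat):Int)) ↔ (j + 1 > rez'.length) from by omega]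
  rw [hconv rez, inner_eq]
  rfl


theorem goB_nil (best : List Int) : goB best [] = best := by rw [goB]

theorem outer_suffix (N : Nat) : ∀ (u : List Int), u.length ≤ N → ∀ (lst : List Int) (s : Nat) (best : List Int),
    lst.drop s = u →
    (List.range' s (lst.length - s)).foldl (stepOut lst) best = goB best u := by
  induction N with
  | zero =>
    intro u hu lst s best hdrop
    have hun : u = [] := by cases u <;> simp_all
    subst hun
    have hL : lst.length - s = 0 := by
      have := congrArg List.length hdrop; simp at this; omega
    rw [hL, goB_nil]
    rfl
  | succ N ih =>
    intro u hu lst s best hdrop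
    have hLd : (lst.drop s).length = lst.length - s := by simp
    cases u with
    | nil =>
      have hL : lst.length - s = 0 := by rw [← hLd, hdrop]; rfl
      rw [hL, goB_nil]; rfl
    | cons x t =>
      have hL : lst.length - s = t.length + 1 := by rw [← hLd, hdrop]; rfl
      by_cases hx : pB x = true
      · -- palindrome head: A processes the k indices of the run, then continues at s+k
        have hgp : get_palindrome x = 1 := by simpa [pB] using hx
        have hk1 : runLen (x :: t) = (t.takeWhile pB).length + 1 := by
          simp [runLen, hx]
        have hkle : runLen (x :: t) ≤ t.length + 1 := by
          have := runLen_le (x :: t); simpa using this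
        have hk0 : 1 ≤ runLen (x :: t) := by omega
        have hsplit : List.range' s (lst.length - s) =
            List.range' s (runLen (x :: t)) ++
              List.range' (s + runLen (x :: t)) (lst.length - (s + runLen (x :: t))) := by
          have h1 : lst.length - s = runLen (x :: t) + (lst.length - (s + runLen (x :: t))) := by
            omega
          rw [h1, ← List.range'_append, one_mul]
        rw [hsplit, List.foldl_append]
        have hks : List.range' s (runLen (x :: t)) =
            s :: List.range' (s + 1) (runLen (x :: t) - 1) := by
          cases hkk : runLen (x :: t) with
          | zero => omega
          | succ k' => rw [List.range'_succ]; simp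
        rw [hks, List.foldl_cons]
        have hstep : stepOut lst best s =
            (if ((runLen (x :: t) : Int) > (best.length : Int)) then
              (x :: t).take (runLen (x :: t)) else best) := by
          unfold stepOut
          rw [hdrop, ← take_runLen (x :: t)]
          simp only [show (runLen (x :: t) > best.length) ↔
            ((runLen (x :: t) : Int) > ((best.length : Nat) : Int)) from by omega]
        rw [hstep]
        have hblen : runLen (x :: t) ≤
            (if ((runLen (x :: t) : Int) > (best.length : Int)) then
              (x :: t).take (runLen (x :: t)) else best).length := by
          split
          · rw [List.length_take]; simp; omega
          · omega
        have hmid : (List.range' (s + 1) (runLen (x :: t) - 1)).foldl (stepOut lst)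
            (if ((runLen (x :: t) : Int) > (best.length : Int)) then
              (x :: t).take (runLen (x :: t)) else best) =
            (if ((runLen (x :: t) : Int) > (best.length : Int)) then
              (x :: t).take (runLen (x :: t)) else best) := by
          apply foldl_keep
          intro x' hx'
          have hmem := List.mem_range'_1.mp hx'
          unfold stepOut
          have hdx : lst.drop x' = (x :: t).drop (x' - s) := by
            have h2 : lst.drop x' = (lst.drop s).drop (x' - s) := by
              rw [List.drop_drop]; congr 1; omega
            rw [h2, hdrop]
          rw [hdx, runLen_drop _ _ (by omega)]
          rw [if_neg (by omega)]
        rw [hmid]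
        have hdrop2 : lst.drop (s + runLen (x :: t)) = (x :: t).drop (runLen (x :: t)) := by
          rw [← hdrop, List.drop_drop]
        rw [ih ((x :: t).drop (runLen (x :: t))) (by simp at hu ⊢; omega) lst
            (s + runLen (x :: t)) _ hdrop2]
        conv_rhs => rw [goB]
        rw [if_pos hgp]
        have hkt : (t.takeWhile (fun y => get_palindrome y = 1)).length + 1 = runLen (x :: t) := by
          rw [hk1]; rfl
        rw [hkt]
        dsimp only
        have hdt : t.drop (runLen (x :: t) - 1) = (x :: t).drop (runLen (x :: t)) := by
          cases hkk : runLen (x :: t) with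
          | zero => omega
          | succ k' => simp
        rw [hdt]
      · -- non-palindrome head: one no-op step, continue at s+1
        have hgp : ¬ get_palindrome x = 1 := by simpa [pB] using hx
        have hr0 : runLen (x :: t) = 0 := by
          simp only [Bool.not_eq_true] at hx
          simp [runLen, hx]
        rw [hL, List.range'_succ, List.foldl_cons]
        have hstep : stepOut lst best s = best := by
          unfold stepOut; rw [hdrop, hr0, if_neg (by omega)]
        rw [hstep]
        have hdrop1 : lst.drop (s + 1) = t := by
          have h2 : lst.drop (s + 1) = (lst.drop s).drop 1 := by rw [List.drop_drop]
          rw [h2, hdrop]; rfl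
        have hL1 : t.length = lst.length - (s + 1) := by omega
        rw [hL1, ih t (by simp at hu; omega) lst (s + 1) best hdrop1]
        conv_rhs => rw [goB]
        rw [if_neg hgp]

-- ===== VERDICT (by name: the statement is the Claim_ definition above) =====
theorem get_longest_all_palindromes_spec : Claim_equal_get_longest_all_palindromes := by
  intro lst _
  unfold Spec_get_longest_all_palindromes get_longest_all_palindromes_alt
  rw [A_eq]
  have h0 : lst.drop 0 = lst := by simp
  have := outer_suffix lst.length lst (by omega) lst 0 [] h0
  simpa using this
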